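-- pv_equiv track=rewrite | github.com/jongyuni/roadtowork | programmers/연습문제/귤 고르기.py | solution
-- ===== SOURCE A (Python) =====
-- from collections import defaultdict
--
-- def solution(k, tangerine):
--     answer = 0
--     many = defaultdict(int)
--     now = 0
--
--     for t in tangerine:
--         many[t] += 1
--
--     guls = list(zip(many.values(), many.keys()))
--     guls.sort(reverse=True)
--
--     for gul in guls:
--         now += gul[0]
--         answer += 1
--         if now >= k:
--             break
--
--     return answer
-- ===== SOURCE B (Python) =====
-- def solution(k, tangerine):
--     cnt = {}
--     for t in tangerine:
--         cnt[t] = cnt.get(t, 0) + 1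
--     n = len(tangerine)
--     # bucket[f] = number of distinct sizes occurring exactly f times
--     bucket = [0] * (n + 1)
--     for f in cnt.values():
--         bucket[f] += 1
--     answer = 0
--     now = 0
--     for f in range(n, 0, -1):
--         for _ in range(bucket[f]):
--             now += f
--             answer += 1
--             if now >= k:
--                 return answer
--     return answer
-- ===== Notes on version B (the rewrite author's own statement) =====
-- stated objective: faster
-- what changed: Replaces sorting the (count, size) pairs with a frequency bucket array scanned from the highest frequency down (bucket sort of the multiplicities), keeping the same greedy selection.
import Mathlib
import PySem

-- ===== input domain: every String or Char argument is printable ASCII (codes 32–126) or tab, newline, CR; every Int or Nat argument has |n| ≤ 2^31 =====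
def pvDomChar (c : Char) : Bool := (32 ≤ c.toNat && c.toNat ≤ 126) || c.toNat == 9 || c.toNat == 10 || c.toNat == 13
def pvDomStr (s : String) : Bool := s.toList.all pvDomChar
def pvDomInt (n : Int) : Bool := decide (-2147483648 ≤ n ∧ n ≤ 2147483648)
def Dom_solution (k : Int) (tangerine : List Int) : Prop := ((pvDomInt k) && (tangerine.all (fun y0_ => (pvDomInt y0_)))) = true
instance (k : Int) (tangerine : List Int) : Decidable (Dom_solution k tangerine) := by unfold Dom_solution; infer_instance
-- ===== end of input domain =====

-- B replaces A's sort of the (count, size) pairs by an O(n) frequency bucket scanned from the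
-- highest frequency down; same greedy selection, same return value.

-- ===== PORT A =====

-- the 'for gul in guls: now += gul[0]; answer += 1; if now >= k: break' loop
def aLoop (k : Int) : List (Int × Int) → Int → Int → Int
  | [], _, answer => answer
  | gul :: rest, now, answer =>
      if now + gul.1 ≥ k then answer + 1 else aLoop k rest (now + gul.1) (answer + 1)

def solution (k : Int) (tangerine : List Int) : Int :=
  -- many[t] += 1 on a defaultdict(int) = read with default 0, add 1, store
  let many := tangerine.foldl (fun d t => d.insert t (d.getD t 0 + 1)) (PySem.Dict.empty : PySem.Dict Int Int)
  let guls := List.zip many.values many.keys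
  let guls := PySem.List.sorted2 guls (·.1) (·.2) true   -- guls.sort(reverse=True), tuple order
  aLoop k guls 0 0

-- ===== PORT B =====

-- 'for _ in range(m): now += f; answer += 1; if now >= k: return answer'
-- result: (returned-early?, now, answer)
def bInner (k : Int) (f : Int) : Nat → Int → Int → Bool × Int × Int
  | 0, now, answer => (false, now, answer)
  | m + 1, now, answer =>
      if now + f ≥ k then (true, now + f, answer + 1) else bInner k f m (now + f) (answer + 1)

-- 'for f in range(n, 0, -1): …' over the bucket list
def bOuter (k : Int) (bucket : List Int) : List Int → Int → Int → Int
  | [], _, answer => answer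
  | f :: rest, now, answer =>
      let r := bInner k f (bucket.getD f.toNat 0).toNat now answer
      if r.1 then r.2.2 else bOuter k bucket rest r.2.1 r.2.2

def solution_alt (k : Int) (tangerine : List Int) : Int :=
  let cnt := tangerine.foldl (fun d t => d.insert t (d.getD t 0 + 1)) (PySem.Dict.empty : PySem.Dict Int Int)
  let n := tangerine.length
  -- bucket[f] += 1 ; every f = cnt[t] satisfies 1 ≤ f ≤ n, so the index is always in range
  let bucket := cnt.values.foldl (fun b f => b.set f.toNat (b.getD f.toNat 0 + 1))
                  (List.replicate (n + 1) 0)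
  bOuter k bucket (PySem.List.pyRange (n : Int) 0 (-1)) 0 0

-- ===== PRECONDITION & SPEC =====
def Spec_solution (k : Int) (tangerine : List Int) (out : Int) : Prop := out = solution_alt k tangerine
instance (k : Int) (tangerine : List Int) (out : Int) : Decidable (Spec_solution k tangerine out) := by unfold Spec_solution; infer_instance

-- ===== CLAIM (what is proved, stated in full; the proofs are below) =====
def Claim_equal_solution : Prop := ∀ (k : Int) (tangerine : List Int), Dom_solution k tangerine → Spec_solution k tangerine (solution k tangerine)

-- ===== LEMMAS AND PROOFS =====

-- common greedy engine over a plain list of counts: (broke-out?, now, answer)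
def run (k : Int) : List Int → Int → Int → Bool × Int × Int
  | [], now, answer => (false, now, answer)
  | c :: cs, now, answer =>
      if now + c ≥ k then (true, now + c, answer + 1) else run k cs (now + c) (answer + 1)

theorem aLoop_eq_run (k : Int) (l : List (Int × Int)) (now ans : Int) :
    aLoop k l now ans = (run k (l.map (·.1)) now ans).2.2 := by
  induction l generalizing now ans with
  | nil => rfl
  | cons g rest ih =>
      simp only [aLoop, List.map, run]
      split_ifs <;> simp [ih]

theorem bInner_eq_run (k f : Int) (m : Nat) (now ans : Int) :
    bInner k f m now ans = run k (List.replicate m f) now ans := by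
  induction m generalizing now ans with
  | zero => rfl
  | succ m ih =>
      simp only [bInner, List.replicate, run]
      split_ifs <;> simp [ih]

theorem run_append (k : Int) (xs ys : List Int) (now ans : Int) :
    run k (xs ++ ys) now ans =
      (if (run k xs now ans).1 then run k xs now ans
       else run k ys (run k xs now ans).2.1 (run k xs now ans).2.2) := by
  induction xs generalizing now ans with
  | nil => simp [run]
  | cons c cs ih =>
      by_cases h : now + c ≥ k
      · simp [run, h]
      · simp [run, h, ih]

theorem bOuter_eq_run (k : Int) (bucket : List Int) (fs : List Int) (now ans : Int) :
    bOuter k bucket fs now ans =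
      (run k (fs.flatMap (fun f => List.replicate (bucket.getD f.toNat 0).toNat f)) now ans).2.2 := by
  induction fs generalizing now ans with
  | nil => rfl
  | cons f rest ih =>
      simp only [bOuter, List.flatMap_cons, bInner_eq_run, run_append]
      split_ifs with h <;> simp [ih]

-- sorted2 with reverse=True is non-increasing in its primary key
theorem insertBy2_pairwise {α : Type} (k1 k2 : α → Int) (x : α) (ys : List α)
    (h : ys.Pairwise (fun a b => k1 b ≤ k1 a)) :
    (PySem.List.insertBy
        (fun a b => decide (k1 b < k1 a) || (!decide (k1 a < k1 b) && decide (k2 b < k2 a)))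
        x ys).Pairwise (fun a b => k1 b ≤ k1 a) := by
  induction ys with
  | nil => simp [PySem.List.insertBy]
  | cons y ys ih =>
      rw [List.pairwise_cons] at h
      simp only [PySem.List.insertBy]
      split_ifs with hxy
      · have hle : k1 y ≤ k1 x := by
          rcases Bool.or_eq_true_iff.mp hxy with h1 | h1
          · exact le_of_lt (of_decide_eq_true h1)
          · have h2 : ¬ (k1 x < k1 y) := by
              have := (Bool.and_eq_true_iff.mp h1).1
              simpa using this
            exact le_of_not_gt h2
        refine List.pairwise_cons.mpr ⟨?_, List.pairwise_cons.mpr h⟩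
        intro z hz
        rcases hz with _ | hz
        · exact hle
        · exact le_trans (h.1 _ (by assumption)) hle
      · have hxley : k1 x ≤ k1 y := by
          have : decide (k1 y < k1 x) = false := by
            cases hb : decide (k1 y < k1 x) with
            | false => rfl
            | true => exact absurd (Bool.or_eq_true_iff.mpr (Or.inl hb)) hxy
          exact le_of_not_gt (of_decide_eq_false this)
        refine List.pairwise_cons.mpr ⟨?_, ih h.2⟩
        intro z hz
        rcases (PySem.List.insertBy_mem_iff _ _ _ _).mp hz with rfl | hz
        · exact hxley
        · exact h.1 _ hz

theorem sorted2_rev_pairwise {α : Type} (xs : List α) (k1 k2 : α → Int) :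
    (PySem.List.sorted2 xs k1 k2 true).Pairwise (fun a b => k1 b ≤ k1 a) := by
  show (List.foldl _ [] xs).Pairwise _
  suffices h : ∀ (acc : List α), acc.Pairwise (fun a b => k1 b ≤ k1 a) →
      (List.foldl (fun acc x => PySem.List.insertBy
        (fun a b => decide (k1 b < k1 a) || (!decide (k1 a < k1 b) && decide (k2 b < k2 a)))
        x acc) acc xs).Pairwise (fun a b => k1 b ≤ k1 a) by
    exact h [] (by simp)
  induction xs with
  | nil => intro acc hacc; exact hacc
  | cons x xs ih =>
      intro acc hacc
      exact ih _ (insertBy2_pairwise k1 k2 x acc hacc)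

-- the bucket list after the increment loop: cell i holds the number of occurrences of i
theorem bucket_getD (l : List Int) (init : List Int)
    (hl : ∀ c ∈ l, 0 ≤ c ∧ c.toNat < init.length) (i : Nat) (hi : i < init.length) :
    (l.foldl (fun b f => b.set f.toNat (b.getD f.toNat 0 + 1)) init).getD i 0
      = init.getD i 0 + l.count (i : Int) := by
  induction l generalizing init with
  | nil => simp
  | cons c l ih =>
      obtain ⟨hc0, hclen⟩ := hl c (List.mem_cons_self ..)
      rw [List.foldl_cons,
        ih (init.set c.toNat (init.getD c.toNat 0 + 1))
          (fun x hx => by simpa using hl x (List.mem_cons_of_mem _ hx))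
          (by simpa using hi)]
      by_cases hci : c = (i : Int)
      · subst hci
        simp only [Int.toNat_natCast] at hclen ⊢
        rw [List.getD_eq_getElem?_getD, List.getElem?_set_self hclen]
        simp only [List.count_cons, List.getD_eq_getElem?_getD, BEq.rfl, if_true,
          Option.getD_some]
        push_cast; ring
      · have hne : c.toNat ≠ i := fun h => hci (by omega)
        rw [List.getD_eq_getElem?_getD, List.getElem?_set_ne hne]
        have h2 : (c == (i : Int)) = false := by simpa using hci
        simp [List.count_cons, List.getD_eq_getElem?_getD, h2]

-- distributing a list over the buckets of its distinct values is a permutation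
theorem perm_flatMap_replicate (fs : List Int) (C : List Int)
    (hnd : fs.Nodup) (hmem : ∀ c ∈ C, c ∈ fs) :
    (fs.flatMap (fun f => List.replicate (C.count f) f)).Perm C := by
  induction fs generalizing C with
  | nil =>
      have : C = [] := List.eq_nil_iff_forall_not_mem.mpr (fun a ha => by simpa using hmem a ha)
      simp [this]
  | cons f fs ih =>
      rw [List.flatMap_cons]
      have htail : (fs.flatMap (fun f' => List.replicate (C.count f') f'))
          = fs.flatMap (fun f' => List.replicate ((C.filter (fun x => !(x == f))).count f') f') := by
        refine List.flatMap_congr (fun x hx => ?_)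
        have hxf : x ≠ f := fun h => (List.nodup_cons.mp hnd).1 (h ▸ hx)
        rw [List.count_filter (by simpa using hxf)]
      rw [htail]
      have hperm := ih (C.filter (fun x => !(x == f))) (List.nodup_cons.mp hnd).2
        (fun c hc => by
          have hcf : c ≠ f := by simpa using (List.mem_filter.mp hc).2
          rcases List.mem_cons.mp (hmem c (List.mem_of_mem_filter hc)) with h | h
          · exact absurd h hcf
          · exact h)
      refine (List.Perm.append_left _ hperm).trans ?_
      rw [← List.filter_beq f]
      exact List.filter_append_perm _ C

-- the expansion of non-increasing values is non-increasing
theorem pairwise_flatMap_replicate (fs : List Int) (m : Int → Nat)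
    (h : fs.Pairwise (fun a b => b ≤ a)) :
    (fs.flatMap (fun f => List.replicate (m f) f)).Pairwise (fun a b => b ≤ a) := by
  induction fs with
  | nil => simp
  | cons f fs ih =>
      rw [List.pairwise_cons] at h
      rw [List.flatMap_cons, List.pairwise_append]
      refine ⟨List.pairwise_replicate.mpr (Or.inr le_rfl), ih h.2, ?_⟩
      intro a ha b hb
      have haf : a = f := (List.mem_replicate.mp ha).2
      rcases List.mem_flatMap.mp hb with ⟨f', hf', hb'⟩
      have hbf : b = f' := (List.mem_replicate.mp hb').2
      exact haf ▸ hbf ▸ h.1 f' hf'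

-- run only looks at the list of counts, so a common descending list ties the two ports together
theorem lists_eq (tangerine : List Int) :
    List.map (fun x : Int × Int => x.1)
      (PySem.List.sorted2
        (List.zip
          (List.foldl (fun (d : PySem.Dict Int Int) (t : Int) => d.insert t (d.getD t 0 + 1))
            (PySem.Dict.empty : PySem.Dict Int Int) tangerine).values
          (List.foldl (fun (d : PySem.Dict Int Int) (t : Int) => d.insert t (d.getD t 0 + 1))
            (PySem.Dict.empty : PySem.Dict Int Int) tangerine).keys)
        (fun x => x.1) (fun x => x.2) true)
    = List.flatMap
        (fun f =>
          List.replicate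
            ((List.foldl (fun (b : List Int) (f : Int) => b.set f.toNat (b.getD f.toNat 0 + 1))
                (List.replicate (tangerine.length + 1) 0)
                (List.foldl (fun (d : PySem.Dict Int Int) (t : Int) => d.insert t (d.getD t 0 + 1))
                  (PySem.Dict.empty : PySem.Dict Int Int) tangerine).values).getD f.toNat 0).toNat
            f)
        (PySem.List.pyRange (tangerine.length : Int) 0 (-1)) := by
  have hctr : tangerine.foldl (fun d t => d.insert t (d.getD t 0 + 1))
      (PySem.Dict.empty : PySem.Dict Int Int) = PySem.Dict.counter tangerine :=
    PySem.Dict.foldl_insert_getD_add_one_eq_counter tangerine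
  rw [hctr]
  set n := tangerine.length with hn
  -- the list of multiplicities, one per distinct value
  set C : List Int := (PySem.Set.ofList tangerine).map
      (fun key => ((tangerine.count key : Nat) : Int)) with hC
  have hitems : (PySem.Dict.counter tangerine).items
      = (PySem.Set.ofList tangerine).map (fun key => (key, ((tangerine.count key : Nat) : Int))) :=
    PySem.Dict.items_counter tangerine
  have hvalues : (PySem.Dict.counter tangerine).values = C := by
    show ((PySem.Dict.counter tangerine).items).map (·.2) = C
    rw [hitems, List.map_map, hC]; rfl
  have hzip : List.zip (PySem.Dict.counter tangerine).values (PySem.Dict.counter tangerine).keys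
      = (PySem.Set.ofList tangerine).map
          (fun key => (((tangerine.count key : Nat) : Int), key)) := by
    show List.zip ((PySem.Dict.counter tangerine).items.map (·.2))
        ((PySem.Dict.counter tangerine).items.map (·.1)) = _
    rw [List.zip_map', hitems, List.map_map]
    rfl
  -- every multiplicity lies in [1, n]
  have hCrange : ∀ c ∈ C, 1 ≤ c ∧ c ≤ (n : Int) := by
    intro c hc
    rcases List.mem_map.mp hc with ⟨key, hkey, rfl⟩
    have hmem : key ∈ tangerine := (PySem.Set.mem_ofList tangerine key).mp hkey
    have h1 : 0 < tangerine.count key := List.count_pos_iff.mpr hmem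
    have h2 : tangerine.count key ≤ n := List.count_le_length
    omega
  -- the bucket list holds the multiset of multiplicities
  have hbucket : ∀ f : Int, 1 ≤ f → f ≤ (n : Int) →
      ((C.foldl (fun (b : List Int) (f : Int) => b.set f.toNat (b.getD f.toNat 0 + 1))
        (List.replicate (n + 1) 0)).getD f.toNat 0).toNat = C.count f := by
    intro f h1 h2
    have hlen : (List.replicate (n + 1) (0 : Int)).length = n + 1 := List.length_replicate
    have := bucket_getD C (List.replicate (n + 1) 0)
      (fun c hc => ⟨by linarith [(hCrange c hc).1], by
        have := hCrange c hc; rw [hlen]; omega⟩)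
      f.toNat (by rw [hlen]; omega)
    rw [this]
    have : ((f.toNat : Nat) : Int) = f := Int.toNat_of_nonneg (by omega)
    simp [this, List.getD_eq_getElem?_getD]
  set fs : List Int := PySem.List.pyRange (n : Int) 0 (-1) with hfs
  have hfs_eq : fs = (List.range (((n : Int) - 0).toNat)).map (fun k : Nat => (n : Int) - (k : Int)) :=
    PySem.List.pyRange_neg_one (n : Int) 0
  have hfs_pair : fs.Pairwise (fun a b => b < a) := by
    rw [hfs_eq]
    exact List.Pairwise.map _ (fun a b (h : a < b) => by omega) List.pairwise_lt_range
  have hfs_nodup : fs.Nodup := hfs_pair.imp (fun h => by omega)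
  have hfs_mem : ∀ f : Int, 1 ≤ f → f ≤ (n : Int) → f ∈ fs := by
    intro f h1 h2
    rw [hfs_eq]
    refine List.mem_map.mpr ⟨((n : Int) - f).toNat, List.mem_range.mpr (by omega), by omega⟩
  -- replace the bucket lookups by counts
  rw [hzip, hvalues]
  have hcong : (fs.flatMap (fun f => List.replicate
        (((C.foldl (fun (b : List Int) (f : Int) => b.set f.toNat (b.getD f.toNat 0 + 1))
          (List.replicate (n + 1) 0)).getD f.toNat 0).toNat) f))
      = fs.flatMap (fun f => List.replicate (C.count f) f) := by
    refine List.flatMap_congr (fun f hf => ?_)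
    rcases (PySem.List.mem_pyRange_iff_of_neg (by norm_num) f).mp (hfs ▸ hf) with ⟨hb, ha, _⟩
    rw [hbucket f (by omega) ha]
  rw [hcong]
  -- both sides are ≥-sorted permutations of C, hence equal
  have hLA_perm : ((PySem.List.sorted2
        ((PySem.Set.ofList tangerine).map (fun key => (((tangerine.count key : Nat) : Int), key)))
        (fun x : Int × Int => x.1) (fun x : Int × Int => x.2) true).map (fun x : Int × Int => x.1)).Perm C := by
    have := (PySem.List.sorted2_perm
      ((PySem.Set.ofList tangerine).map (fun key => (((tangerine.count key : Nat) : Int), key)))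
      (fun x : Int × Int => x.1) (fun x : Int × Int => x.2) true).map (fun x : Int × Int => x.1)
    rw [List.map_map] at this
    exact this
  have hLB_perm : (fs.flatMap (fun f => List.replicate (C.count f) f)).Perm C :=
    perm_flatMap_replicate fs C hfs_nodup
      (fun c hc => hfs_mem c (hCrange c hc).1 (hCrange c hc).2)
  have hLA_pair : ((PySem.List.sorted2
        ((PySem.Set.ofList tangerine).map (fun key => (((tangerine.count key : Nat) : Int), key)))
        (fun x : Int × Int => x.1) (fun x : Int × Int => x.2) true).map (fun x : Int × Int => x.1)).Pairwise (fun a b => b ≤ a) :=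
    List.Pairwise.map _ (fun a b h => h)
      (sorted2_rev_pairwise _ (fun x : Int × Int => x.1) (fun x : Int × Int => x.2))
  have hLB_pair : (fs.flatMap (fun f => List.replicate (C.count f) f)).Pairwise
      (fun a b => b ≤ a) :=
    pairwise_flatMap_replicate fs _ (hfs_pair.imp le_of_lt)
  exact List.Perm.eq_of_pairwise
    (fun a b _ _ h1 h2 => le_antisymm h2 h1) hLA_pair hLB_pair
    (hLA_perm.trans hLB_perm.symm)

theorem solution_spec : Claim_equal_solution := by
  intro k tangerine _
  show solution k tangerine = solution_alt k tangerine
  rw [solution, solution_alt]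
  simp only [aLoop_eq_run, bOuter_eq_run]
  rw [lists_eq tangerine]
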